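-- pv_equiv track=rewrite | github.com/milanbella/ansible | library/idempiere.py | getNotExecutedSqlsDict
-- ===== SOURCE A (Python) =====
-- cFILE = 'migrate.py'
--
-- def getNotExecutedSqlsDict(sourcecodeSqlsDict, executedSqls):
--     cFUNC = 'getNotExecutedSqlsDict()'
--     try:
--         sqls = {}
--         executed = set(executedSqls);
--         for sql in sourcecodeSqlsDict.keys():
--             if sql not in set(executedSqls):
--                 sqls[sql] = sourcecodeSqlsDict[sql]
--         return sqls
--     except:
--         raise Exception('{}:{}: error'.format(cFILE, cFUNC))
-- ===== SOURCE B (Python) =====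
-- cFILE = 'migrate.py'
--
-- def getNotExecutedSqlsDict(sourcecodeSqlsDict, executedSqls):
--     cFUNC = 'getNotExecutedSqlsDict()'
--     try:
--         result = dict(sourcecodeSqlsDict)
--         for sql in set(executedSqls):
--             result.pop(sql, None)
--         return result
--     except:
--         raise Exception('{}:{}: error'.format(cFILE, cFUNC))
-- ===== Notes on version B (the rewrite author's own statement) =====
-- stated objective: faster
-- what changed: B copies the dict once and prunes it by popping each executed key (loop over set(executedSqls)), instead of scanning every source key and re-building set(executedSqls) for each membership test before inserting into a fresh dict.
import Mathlib
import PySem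

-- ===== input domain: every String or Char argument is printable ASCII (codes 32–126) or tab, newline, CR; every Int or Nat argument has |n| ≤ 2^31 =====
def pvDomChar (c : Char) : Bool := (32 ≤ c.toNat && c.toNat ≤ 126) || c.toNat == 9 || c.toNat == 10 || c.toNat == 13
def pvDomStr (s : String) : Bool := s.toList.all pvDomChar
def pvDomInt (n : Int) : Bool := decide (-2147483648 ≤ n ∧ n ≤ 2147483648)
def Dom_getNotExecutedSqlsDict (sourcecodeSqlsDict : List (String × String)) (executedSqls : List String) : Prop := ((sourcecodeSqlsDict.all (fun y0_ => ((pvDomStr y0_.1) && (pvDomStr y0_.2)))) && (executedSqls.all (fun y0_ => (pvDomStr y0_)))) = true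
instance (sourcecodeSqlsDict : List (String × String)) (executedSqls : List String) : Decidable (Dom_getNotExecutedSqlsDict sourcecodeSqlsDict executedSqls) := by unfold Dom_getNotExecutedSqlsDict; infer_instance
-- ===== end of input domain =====

-- B prunes a one-time copy of the dict by popping each executed key, instead of scanning
-- the source keys and re-building set(executedSqls) per key before inserting (objective: faster).

-- ===== PORT A =====
-- A iterates over the dict's keys; 'sourcecodeSqlsDict[sql]' never raises there, so getD with
-- a dummy default is exact.
def getNotExecutedSqlsDict (sourcecodeSqlsDict : List (String × String)) (executedSqls : List String) : List (String × String) :=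
  ((PySem.Dict.mk sourcecodeSqlsDict).keys.foldl
    (fun sqls sql =>
      if !((PySem.Set.ofList executedSqls).contains sql) then
        sqls.insert sql ((PySem.Dict.mk sourcecodeSqlsDict).getD sql "")
      else sqls)
    PySem.Dict.empty).items

-- ===== PORT B =====
def getNotExecutedSqlsDict_alt (sourcecodeSqlsDict : List (String × String)) (executedSqls : List String) : List (String × String) :=
  ((PySem.Set.ofList executedSqls).foldl
    (fun result sql => result.erase sql)
    (PySem.Dict.mk sourcecodeSqlsDict)).items

-- ===== PRECONDITION & SPEC =====
-- Pre_ requires distinct keys: the Python argument is a dict, which cannot hold duplicate keys,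
-- so an association list with duplicate keys does not represent any input A is ever called on.
def Pre_getNotExecutedSqlsDict (sourcecodeSqlsDict : List (String × String)) (executedSqls : List String) : Prop :=
  (sourcecodeSqlsDict.map Prod.fst).Nodup
instance (sourcecodeSqlsDict : List (String × String)) (executedSqls : List String) : Decidable (Pre_getNotExecutedSqlsDict sourcecodeSqlsDict executedSqls) := by unfold Pre_getNotExecutedSqlsDict; infer_instance
def pvWitness_getNotExecutedSqlsDict : (List (String × String)) × List String :=
  ([("a", "select 1"), ("b", "select 2")], ["b", "c"])
def Spec_getNotExecutedSqlsDict (sourcecodeSqlsDict : List (String × String)) (executedSqls : List String) (out : List (String × String)) : Prop := out = getNotExecutedSqlsDict_alt sourcecodeSqlsDict executedSqls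
instance (sourcecodeSqlsDict : List (String × String)) (executedSqls : List String) (out : List (String × String)) : Decidable (Spec_getNotExecutedSqlsDict sourcecodeSqlsDict executedSqls out) := by unfold Spec_getNotExecutedSqlsDict; infer_instance

-- ===== CLAIM (what is proved, stated in full; the proofs are below) =====
def Claim_equal_getNotExecutedSqlsDict : Prop := ∀ (sourcecodeSqlsDict : List (String × String)) (executedSqls : List String), Dom_getNotExecutedSqlsDict sourcecodeSqlsDict executedSqls → Pre_getNotExecutedSqlsDict sourcecodeSqlsDict executedSqls → Spec_getNotExecutedSqlsDict sourcecodeSqlsDict executedSqls (getNotExecutedSqlsDict sourcecodeSqlsDict executedSqls)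

-- ===== LEMMAS AND PROOFS =====

theorem erase_items {κ ν : Type} [BEq κ] (d : PySem.Dict κ ν) (k : κ) :
    (d.erase k).items = d.items.filter (fun p => !(p.1 == k)) := by
  rfl

-- B's loop: erasing every key of l filters the items by membership in l.
theorem foldl_erase_items {κ ν : Type} [BEq κ] (l : List κ) (d : PySem.Dict κ ν) :
    (l.foldl (fun r k => r.erase k) d).items
      = d.items.filter (fun p => !(l.contains p.1)) := by
  induction l generalizing d with
  | nil => simp
  | cons k t ih =>
      simp only [List.foldl_cons, ih, erase_items, List.filter_filter]
      apply List.filter_congr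
      intro p _
      simp [Bool.and_comm]

-- A's loop: inserting fresh distinct keys (those passing the filter) appends their pairs.
theorem foldl_insert_filter_items {κ ν : Type} [BEq κ] [LawfulBEq κ]
    (c : κ → Bool) (ps : List (κ × ν)) (acc : PySem.Dict κ ν)
    (hfresh : ∀ p ∈ ps, acc.contains p.1 = false)
    (hnd : (ps.map Prod.fst).Nodup) :
    (ps.foldl (fun s p => if !(c p.1) then s.insert p.1 p.2 else s) acc).items
      = acc.items ++ ps.filter (fun p => !(c p.1)) := by
  induction ps generalizing acc with
  | nil => simp
  | cons p t ih =>
      simp only [List.map_cons, List.nodup_cons] at hnd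
      by_cases hc : c p.1
      · rw [List.foldl_cons, if_neg (by simp [hc])]
        rw [ih acc (fun q hq => hfresh q (List.mem_cons_of_mem _ hq)) hnd.2]
        simp [hc]
      · rw [List.foldl_cons, if_pos (by simp [hc])]
        rw [ih (acc.insert p.1 p.2) ?_ hnd.2]
        · rw [PySem.Dict.items_insert_of_not_contains acc p.2 (hfresh p (List.mem_cons_self))]
          simp [hc]
        · intro q hq
          rw [PySem.Dict.contains_insert]
          have hne : (q.1 == p.1) = false := by
            simp only [beq_eq_false_iff_ne, ne_eq]
            intro h
            exact hnd.1 (h ▸ List.mem_map_of_mem hq)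
          simp [hne, hfresh q (List.mem_cons_of_mem _ hq)]

theorem items_mk {κ ν : Type} [BEq κ] (l : List (κ × ν)) : (PySem.Dict.mk l).items = l := rfl

theorem keys_mk' {κ ν : Type} [BEq κ] (l : List (κ × ν)) :
    (PySem.Dict.mk l).keys = l.map Prod.fst := rfl

-- ===== VERDICT (by name: the statement is the Claim_ definition above) =====
theorem getNotExecutedSqlsDict_spec : Claim_equal_getNotExecutedSqlsDict := by
  intro d ex _ hpre
  unfold Spec_getNotExecutedSqlsDict getNotExecutedSqlsDict getNotExecutedSqlsDict_alt
  rw [foldl_erase_items, items_mk, keys_mk', List.foldl_map]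
  have hkeys : (PySem.Dict.mk d).keys.Nodup := hpre
  have hcongr :
      d.foldl (fun sqls p =>
          if !((PySem.Set.ofList ex).contains p.1) then
            sqls.insert p.1 ((PySem.Dict.mk d).getD p.1 "")
          else sqls) PySem.Dict.empty
        = d.foldl (fun sqls p =>
          if !((PySem.Set.ofList ex).contains p.1) then
            sqls.insert p.1 p.2
          else sqls) PySem.Dict.empty := by
    apply PySem.List.foldl_congr_mem
    intro acc p hp
    obtain ⟨k, v⟩ := p
    rw [PySem.Dict.getD_of_mem_items _ hp hkeys]
  rw [hcongr,
    foldl_insert_filter_items _ d PySem.Dict.empty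
      (fun q _ => PySem.Dict.contains_empty q.1) hpre]
  simp [PySem.Dict.empty]
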